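-- pv_equiv track=rewrite | github.com/sshiraiwa/numba_experiments | test.py | generate_caller_text
-- ===== SOURCE A (Python) =====
-- def generate_caller_text(settings):
--     text = ['def c12_caller(ptx, data):']
--
--     count = 0
--
--     params_line = '    params = ('
--     for s in settings["input"]:
--         if s == 2:
--             t = '    arr'+str(count) + ' = data[' + str(count) + ']+1j*data[' + str(count) +'+1]'
--             params_line += 'arr'+str(count)+','
--             count = count + 2
--         else:
--             t = '    arr'+str(count) + ' = data[' + str(count) + ']'
--             params_line += 'arr'+str(count)+','
--             count = count + 1
--         text.append(t)
--     params_line += ')'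
--
--     text.append(params_line)
--     text.append("    return (inner_func(ptx, *params))")
--     return '\n'.join(text)
-- ===== SOURCE B (Python) =====
-- def generate_caller_text(settings):
--     inp = settings["input"]
--     offsets = []
--     o = 0
--     for s in inp:
--         offsets.append(o)
--         o += 2 if s == 2 else 1
--     arr_lines = [
--         ('    arr%d = data[%d]+1j*data[%d+1]' % (o, o, o)) if s == 2
--         else ('    arr%d = data[%d]' % (o, o))
--         for s, o in zip(inp, offsets)
--     ]
--     params = '    params = (' + ''.join('arr%d,' % o for o in offsets) + ')'
--     return '\n'.join(['def c12_caller(ptx, data):'] + arr_lines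
--                      + [params, '    return (inner_func(ptx, *params))'])
-- ===== Notes on version B (the rewrite author's own statement) =====
-- stated objective: alternative
-- what changed: A's single stateful loop threading a running counter and two growing accumulators is replaced by a prefix-sum offsets pass followed by independent comprehensions over (setting, offset) pairs, assembled with one join.
-- outside the precondition, e.g. on generate_caller_text({}): A raises KeyError, B raises KeyError
import Mathlib
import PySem

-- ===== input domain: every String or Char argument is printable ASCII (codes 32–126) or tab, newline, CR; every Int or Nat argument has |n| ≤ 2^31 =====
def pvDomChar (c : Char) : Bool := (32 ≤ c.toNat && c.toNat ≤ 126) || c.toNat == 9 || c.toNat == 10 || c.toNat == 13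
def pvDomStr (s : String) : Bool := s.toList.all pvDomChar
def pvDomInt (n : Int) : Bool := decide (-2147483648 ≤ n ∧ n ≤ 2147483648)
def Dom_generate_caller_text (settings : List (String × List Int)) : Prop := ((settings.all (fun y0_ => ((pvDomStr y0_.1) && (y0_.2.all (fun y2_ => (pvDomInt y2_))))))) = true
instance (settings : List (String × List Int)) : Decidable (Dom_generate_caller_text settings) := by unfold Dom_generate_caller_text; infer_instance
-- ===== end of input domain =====

-- B replaces A's single stateful loop (running counter + two growing accumulators) by a
-- prefix-sum offsets pass followed by comprehensions over the (setting, offset) pairs; objective: alternative decomposition.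

-- ===== PORT A =====
-- A's for-loop over settings["input"], carrying (count, text, params_line) exactly as A does.
def gctA_loop : List Int → Int → List String → String → List String × String
  | [], _, text, pl => (text, pl)
  | s :: rest, count, text, pl =>
    if s == 2 then
      let t := "    arr" ++ PySem.Int.toStr count ++ " = data[" ++ PySem.Int.toStr count
               ++ "]+1j*data[" ++ PySem.Int.toStr count ++ "+1]"
      gctA_loop rest (count + 2) (text ++ [t]) (pl ++ "arr" ++ PySem.Int.toStr count ++ ",")
    else
      let t := "    arr" ++ PySem.Int.toStr count ++ " = data[" ++ PySem.Int.toStr count ++ "]"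
      gctA_loop rest (count + 1) (text ++ [t]) (pl ++ "arr" ++ PySem.Int.toStr count ++ ",")

def generate_caller_text (settings : List (String × List Int)) : String :=
  match (PySem.Dict.mk settings).get? "input" with
  | none => ""   -- settings["input"] raises KeyError; excluded by Pre_
  | some inp =>
    let r := gctA_loop inp 0 ["def c12_caller(ptx, data):"] "    params = ("
    PySem.Str.join "\n" (r.1 ++ [r.2 ++ ")", "    return (inner_func(ptx, *params))"])

-- ===== PORT B =====
-- offsets: the running prefix sums of the element sizes (2 for s == 2, else 1).
def gctB_offsets : Int → List Int → List Int
  | _, [] => []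
  | o, s :: rest => o :: gctB_offsets (o + (if s == 2 then 2 else 1)) rest

def gctB_line (p : Int × Int) : String :=
  if p.1 == 2 then
    "    arr" ++ PySem.Int.toStr p.2 ++ " = data[" ++ PySem.Int.toStr p.2
      ++ "]+1j*data[" ++ PySem.Int.toStr p.2 ++ "+1]"
  else
    "    arr" ++ PySem.Int.toStr p.2 ++ " = data[" ++ PySem.Int.toStr p.2 ++ "]"

def generate_caller_text_alt (settings : List (String × List Int)) : String :=
  match (PySem.Dict.mk settings).get? "input" with
  | none => ""   -- settings["input"] raises KeyError; excluded by Pre_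
  | some inp =>
    let offs := gctB_offsets 0 inp
    let arrLines := (inp.zip offs).map gctB_line
    let params := "    params = ("
      ++ PySem.Str.join "" (offs.map (fun o => "arr" ++ PySem.Int.toStr o ++ ",")) ++ ")"
    PySem.Str.join "\n" (["def c12_caller(ptx, data):"] ++ arrLines
      ++ [params, "    return (inner_func(ptx, *params))"])

-- ===== PRECONDITION & SPEC =====
-- A does settings["input"]: a dict without the key "input" raises KeyError, so it is excluded.
def Pre_generate_caller_text (settings : List (String × List Int)) : Prop :=
  ((PySem.Dict.mk settings).get? "input").isSome = true
instance (settings : List (String × List Int)) : Decidable (Pre_generate_caller_text settings) := by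
  unfold Pre_generate_caller_text; infer_instance
def pvWitness_generate_caller_text : (List (String × List Int)) := [("input", [2, 1, 3])]

def Spec_generate_caller_text (settings : List (String × List Int)) (out : String) : Prop := out = generate_caller_text_alt settings
instance (settings : List (String × List Int)) (out : String) : Decidable (Spec_generate_caller_text settings out) := by unfold Spec_generate_caller_text; infer_instance

-- ===== CLAIM (what is proved, stated in full; the proofs are below) =====
def Claim_equal_generate_caller_text : Prop := ∀ (settings : List (String × List Int)), Dom_generate_caller_text settings → Pre_generate_caller_text settings → Spec_generate_caller_text settings (generate_caller_text settings)

-- ===== LEMMAS AND PROOFS =====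

theorem join_e_nil : PySem.Str.join "" ([] : List String) = "" := rfl

theorem join_e_cons (x : String) (xs : List String) :
    PySem.Str.join "" (x :: xs) = x ++ PySem.Str.join "" xs := by
  simp [PySem.Str.join, PySem.Chars.join, List.intercalate]
  cases xs with
  | nil => simp
  | cons y ys => simp [String.ofList_append]

theorem gctA_loop_eq (inp : List Int) : ∀ (count : Int) (text : List String) (pl : String),
    gctA_loop inp count text pl =
      (text ++ (inp.zip (gctB_offsets count inp)).map gctB_line,
       pl ++ PySem.Str.join ""
         ((gctB_offsets count inp).map (fun o => "arr" ++ PySem.Int.toStr o ++ ","))) := by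
  induction inp with
  | nil =>
    intro count text pl
    simp [gctA_loop, gctB_offsets, join_e_nil]
  | cons s rest ih =>
    intro count text pl
    by_cases hs : s = 2
    · subst hs
      simp [gctA_loop, gctB_offsets, gctB_line, ih, join_e_cons, String.append_assoc]
    · have hb : (s == (2 : Int)) = false := by simp [hs]
      simp [gctA_loop, gctB_offsets, gctB_line, hb, ih, join_e_cons, String.append_assoc]

-- ===== VERDICT (by name: the statement is the Claim_ definition above) =====
theorem generate_caller_text_spec : Claim_equal_generate_caller_text := by
  intro settings _ hpre
  unfold Spec_generate_caller_text generate_caller_text generate_caller_text_alt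
  cases h : (PySem.Dict.mk settings).get? "input" with
  | none => exact absurd hpre (by unfold Pre_generate_caller_text; simp [h])
  | some inp =>
    simp only [gctA_loop_eq]
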